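-- pv_equiv track=rewrite | github.com/KushnirDmytro/AI_HW4 | CSP_scedule.py | daily_overtime
-- ===== SOURCE A (Python) =====
-- def daily_overtime(partial_assignment, coef):
--     whole_day_study_time = 0
--     previous_time_slot = (0, 0)  # init value
--     overtime = 0
--     for t_s in partial_assignment:
--         this_time_slot = partial_assignment[t_s]
--
--         # checking for natural breaks in timeline
--         if t_s[0] != previous_time_slot[0]:  # if day changed
--             whole_day_study_time = 0
--
--         if this_time_slot in ['AI', 'WEB', 'Optional']:
--             whole_day_study_time += 1
--         if (t_s[0] < 5 and (whole_day_study_time > 4)) or (whole_day_study_time > 8):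
--             overtime += 1
--         previous_time_slot = t_s  # memorising after processing
--
--     return -overtime * coef
-- ===== SOURCE B (Python) =====
-- def daily_overtime(partial_assignment, coef):
--     # run-based decomposition: split the schedule keys into maximal
--     # consecutive same-day runs; per run, count study slots from zero.
--     keys = list(partial_assignment)
--     n = len(keys)
--     overtime = 0
--     i = 0
--     while i < n:
--         day = keys[i][0]
--         study = 0
--         while i < n and keys[i][0] == day:
--             if partial_assignment[keys[i]] in ('AI', 'WEB', 'Optional'):
--                 study += 1
--             if (day < 5 and study > 4) or study > 8:
--                 overtime += 1
--             i += 1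
--     return -overtime * coef
-- ===== Notes on version B (the rewrite author's own statement) =====
-- stated objective: alternative
-- what changed: A is a single pass over the dict with a whole-day counter that is reset by comparing each key's day to the previous key's day; B replaces that by an explicit two-level loop: an outer loop that starts at each maximal consecutive same-day run of keys and an inner loop that consumes the run while counting study slots from zero.
import Mathlib
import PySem

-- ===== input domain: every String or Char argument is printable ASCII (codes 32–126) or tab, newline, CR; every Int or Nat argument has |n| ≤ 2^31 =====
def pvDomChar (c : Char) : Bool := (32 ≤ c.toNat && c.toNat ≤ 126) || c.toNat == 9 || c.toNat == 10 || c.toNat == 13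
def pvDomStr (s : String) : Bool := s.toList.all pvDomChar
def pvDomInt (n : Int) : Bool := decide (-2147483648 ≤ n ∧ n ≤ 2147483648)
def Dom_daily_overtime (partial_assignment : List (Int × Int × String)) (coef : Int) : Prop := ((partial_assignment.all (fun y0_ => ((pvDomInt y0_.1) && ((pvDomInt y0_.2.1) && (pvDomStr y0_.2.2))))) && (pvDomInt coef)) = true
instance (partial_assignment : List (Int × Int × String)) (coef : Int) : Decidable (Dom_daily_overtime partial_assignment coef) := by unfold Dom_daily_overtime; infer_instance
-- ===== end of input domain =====

-- B replaces A's single pass with a reset-on-day-change flag by an outer loop over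
-- maximal consecutive same-day runs with an inner per-run loop (same cost; objective: alternative).
-- The dict is the association list in insertion order; iterating its entries gives each
-- key with its value (Python dict keys are unique, so the lookup `partial_assignment[t_s]`
-- is exactly the entry's own value).

-- ===== PORT A =====
-- state = (whole_day_study_time, previous_day, overtime); only previous_time_slot[0] is read.
def pvAStep (st : Int × Int × Int) (t : Int × Int × String) : Int × Int × Int :=
  let wd0 := if t.1 ≠ st.2.1 then 0 else st.1
  let wd1 := if t.2.2 ∈ ["AI", "WEB", "Optional"] then wd0 + 1 else wd0
  let ot1 := if (t.1 < 5 ∧ wd1 > 4) ∨ wd1 > 8 then st.2.2 + 1 else st.2.2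
  (wd1, t.1, ot1)

def daily_overtime (partial_assignment : List (Int × Int × String)) (coef : Int) : Int :=
  -(partial_assignment.foldl pvAStep (0, 0, 0)).2.2 * coef

-- ===== PORT B =====
-- inner while loop of Source B: consume entries while the day is unchanged,
-- counting study slots from `study` and overtime into `ot`; returns (ot, remainder).
def pvBRun (day study ot : Int) : List (Int × Int × String) → Int × List (Int × Int × String)
  | [] => (ot, [])
  | t :: rest =>
    if t.1 = day then
      let study1 := if t.2.2 ∈ ["AI", "WEB", "Optional"] then study + 1 else study
      let ot1 := if (day < 5 ∧ study1 > 4) ∨ study1 > 8 then ot + 1 else ot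
      pvBRun day study1 ot1 rest
    else (ot, t :: rest)

theorem pvBRun_len (l : List (Int × Int × String)) :
    ∀ day study ot, ((pvBRun day study ot l).2).length ≤ l.length := by
  induction l with
  | nil => intro day study ot; simp [pvBRun]
  | cons t rest ih =>
    intro day study ot
    simp only [pvBRun]
    split_ifs <;> first | exact le_trans (ih _ _ _) (Nat.le_succ _) | simp

theorem pvBRun_match (t : Int × Int × String) (rest : List (Int × Int × String)) (s o : Int) :
    pvBRun t.1 s o (t :: rest)
      = pvBRun t.1 (if t.2.2 ∈ ["AI", "WEB", "Optional"] then s + 1 else s)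
          (if (t.1 < 5 ∧ (if t.2.2 ∈ ["AI", "WEB", "Optional"] then s + 1 else s) > 4)
              ∨ (if t.2.2 ∈ ["AI", "WEB", "Optional"] then s + 1 else s) > 8
           then o + 1 else o) rest := by
  simp [pvBRun]

theorem pvBRun_cons_lt (t : Int × Int × String) (rest : List (Int × Int × String)) (s o : Int) :
    ((pvBRun t.1 s o (t :: rest)).2).length < (t :: rest).length := by
  rw [pvBRun_match, List.length_cons]
  exact Nat.lt_succ_of_le (pvBRun_len rest _ _ _)

-- outer while loop of Source B: start a run at each remaining head, threading overtime.
def pvBOuter (ot : Int) : List (Int × Int × String) → Int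
  | [] => ot
  | t :: rest =>
    pvBOuter (pvBRun t.1 0 ot (t :: rest)).1 ((pvBRun t.1 0 ot (t :: rest)).2)
termination_by l => l.length
decreasing_by exact pvBRun_cons_lt _ _ _ _

def daily_overtime_alt (partial_assignment : List (Int × Int × String)) (coef : Int) : Int :=
  -(pvBOuter 0 partial_assignment) * coef

-- ===== PRECONDITION & SPEC =====
def Spec_daily_overtime (partial_assignment : List (Int × Int × String)) (coef : Int) (out : Int) : Prop := out = daily_overtime_alt partial_assignment coef
instance (partial_assignment : List (Int × Int × String)) (coef : Int) (out : Int) : Decidable (Spec_daily_overtime partial_assignment coef out) := by unfold Spec_daily_overtime; infer_instance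

-- ===== CLAIM (what is proved, stated in full; the proofs are below) =====
def Claim_equal_daily_overtime : Prop := ∀ (partial_assignment : List (Int × Int × String)) (coef : Int), Dom_daily_overtime partial_assignment coef → Spec_daily_overtime partial_assignment coef (daily_overtime partial_assignment coef)

-- ===== LEMMAS AND PROOFS =====

-- A's overtime accumulator is additive in its starting value.
theorem pvA_add (l : List (Int × Int × String)) :
    ∀ wd d o : Int, ((l.foldl pvAStep (wd, d, o)).2.2) = o + ((l.foldl pvAStep (wd, d, 0)).2.2) := by
  induction l with
  | nil => intro wd d o; simp
  | cons t rest ih =>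
    intro wd d o
    simp only [List.foldl_cons, pvAStep]
    split_ifs <;> first
      | (rw [ih, ih _ _ ((0 : Int) + 1)]; omega)
      | rw [ih]

-- B's inner loop: remainder does not depend on the overtime accumulator …
theorem pvBRun_snd (l : List (Int × Int × String)) :
    ∀ day s o o' : Int, (pvBRun day s o l).2 = (pvBRun day s o' l).2 := by
  induction l with
  | nil => intro day s o o'; simp [pvBRun]
  | cons t rest ih =>
    intro day s o o'
    simp only [pvBRun]
    split_ifs <;> first | exact ih _ _ _ _ | rfl

-- … and its overtime count is additive in the starting value.
theorem pvBRun_fst (l : List (Int × Int × String)) :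
    ∀ day s o : Int, (pvBRun day s o l).1 = o + (pvBRun day s 0 l).1 := by
  induction l with
  | nil => intro day s o; simp [pvBRun]
  | cons t rest ih =>
    intro day s o
    simp only [pvBRun]
    split_ifs <;> first
      | (rw [ih, ih _ _ ((0 : Int) + 1)]; omega)
      | rw [ih]
      | simp

-- B's outer loop is additive in the threaded overtime accumulator.
theorem pvBOuter_add : ∀ (n : Nat) (l : List (Int × Int × String)), l.length ≤ n →
    ∀ ot : Int, pvBOuter ot l = ot + pvBOuter 0 l := by
  intro n
  induction n with
  | zero =>
    intro l hl ot
    have : l = [] := List.eq_nil_of_length_eq_zero (Nat.le_zero.mp hl)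
    subst this; simp [pvBOuter]
  | succ n ih =>
    intro l hl ot
    cases l with
    | nil => simp [pvBOuter]
    | cons t rest =>
      simp only [pvBOuter]
      have hsnd : (pvBRun t.1 0 ot (t :: rest)).2 = (pvBRun t.1 0 0 (t :: rest)).2 :=
        pvBRun_snd _ _ _ _ _
      have hlen : ((pvBRun t.1 0 0 (t :: rest)).2).length ≤ n := by
        have := pvBRun_cons_lt t rest 0 0
        simp only [List.length_cons] at this hl ⊢
        omega
      rw [hsnd, ih _ hlen, ih _ hlen ((pvBRun t.1 0 0 (t :: rest)).1), pvBRun_fst]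
      omega

-- One step of each loop at a head entry whose day matches the current run.
theorem pvAStep_match (t : Int × Int × String) (wd o : Int) :
    pvAStep (wd, t.1, o) t
      = ((if t.2.2 ∈ ["AI", "WEB", "Optional"] then wd + 1 else wd), t.1,
         (if (t.1 < 5 ∧ (if t.2.2 ∈ ["AI", "WEB", "Optional"] then wd + 1 else wd) > 4)
             ∨ (if t.2.2 ∈ ["AI", "WEB", "Optional"] then wd + 1 else wd) > 8
          then o + 1 else o)) := by
  simp [pvAStep]

-- Main invariant: A's fold, continuing a run of day `day` with `wd` study slots so
-- far and overtime 0, equals B's run on the rest plus B's outer loop on the remainder.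
theorem pvMain (l : List (Int × Int × String)) :
    ∀ day wd : Int, ((l.foldl pvAStep (wd, day, 0)).2.2)
      = (pvBRun day wd 0 l).1 + pvBOuter 0 (pvBRun day wd 0 l).2 := by
  induction l with
  | nil => intro day wd; simp [pvBRun, pvBOuter]
  | cons t rest ih =>
    intro day wd
    by_cases h : t.1 = day
    · subst h
      rw [List.foldl_cons, pvAStep_match, pvBRun_match]
      generalize (if t.2.2 ∈ ["AI", "WEB", "Optional"] then wd + 1 else wd) = W
      generalize (if (t.1 < 5 ∧ W > 4) ∨ W > 8 then (0 : Int) + 1 else 0) = O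
      rw [pvA_add, ih, pvBRun_fst rest t.1 W O, pvBRun_snd rest t.1 W O 0]
      omega
    · simp only [List.foldl_cons, pvAStep, if_pos h, pvBRun, if_neg h]
      rw [pvA_add]
      -- unfold one step of pvBOuter on the untouched remainder t :: rest
      have houter : pvBOuter 0 (t :: rest)
          = pvBOuter (pvBRun t.1 0 0 (t :: rest)).1 ((pvBRun t.1 0 0 (t :: rest)).2) := by
        simp only [pvBOuter]
      have hlen : ((pvBRun t.1 0 0 (t :: rest)).2).length ≤ rest.length + 1 := by
        simpa using pvBRun_len (t :: rest) t.1 0 0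
      rw [houter, pvBOuter_add _ _ hlen, pvBRun_match]
      generalize (if t.2.2 ∈ ["AI", "WEB", "Optional"] then (0 : Int) + 1 else 0) = W
      generalize (if (t.1 < 5 ∧ W > 4) ∨ W > 8 then (0 : Int) + 1 else 0) = O
      rw [ih, pvBRun_fst rest t.1 W O, pvBRun_snd rest t.1 W O 0]
      omega

-- The first entry starts a fresh run whether or not its day is the initial value 0.
theorem pvTop (pa : List (Int × Int × String)) :
    ((pa.foldl pvAStep (0, 0, 0)).2.2) = pvBOuter 0 pa := by
  cases pa with
  | nil => simp [pvBOuter]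
  | cons t rest =>
    have hstep : pvAStep (0, 0, 0) t = pvAStep ((0 : Int), t.1, (0 : Int)) t := by
      simp [pvAStep]
    have hmain := pvMain (t :: rest) t.1 0
    simp only [List.foldl_cons] at hmain ⊢
    rw [hstep, hmain]
    have hlen : ((pvBRun t.1 0 0 (t :: rest)).2).length ≤ (t :: rest).length := pvBRun_len _ _ _ _
    simp only [pvBOuter]
    rw [pvBOuter_add _ _ hlen ((pvBRun t.1 0 0 (t :: rest)).1)]

-- ===== VERDICT (by name: the statement is the Claim_ definition above) =====
theorem daily_overtime_spec : Claim_equal_daily_overtime := by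
  intro pa coef _
  unfold Spec_daily_overtime daily_overtime daily_overtime_alt
  rw [pvTop]
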